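-- pv_equiv track=rewrite | github.com/alxz0212/Prueba_Script_Docker | hadoop_lab/advanced_stats_mr.py | reducer_aggregate_stats
-- ===== SOURCE A (Python) =====
-- def reducer_aggregate_stats(team, stats_list):
--     total_gs = 0
--     total_gc = 0
--     total_red = 0
--     total_yel = 0
--     total_wins = 0
--
--     for s in stats_list:
--         total_gs += s[0]
--         total_gc += s[1]
--         total_red += s[2]
--         total_yel += s[3]
--         total_wins += s[4]
--
--     yield team, {
--         "Goles_Favor": total_gs,
--         "Goles_Contra": total_gc,
--         "Rojas": total_red,
--         "Amarillas": total_yel,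
--         "Victorias": total_wins
--     }
-- ===== SOURCE B (Python) =====
-- def reducer_aggregate_stats(team, stats_list):
--     keys = ("Goles_Favor", "Goles_Contra", "Rojas", "Amarillas", "Victorias")
--     cols = list(zip(*stats_list)) or [()] * 5
--     yield team, {k: sum(col) for k, col in zip(keys, cols)}
-- ===== Notes on version B (the rewrite author's own statement) =====
-- stated objective: idiomatic
-- what changed: B transposes the rows with zip(*stats_list) and sums each column independently, building the dict by zipping keys with column sums, instead of A's row-major loop over five running accumulators.
import Mathlib
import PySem

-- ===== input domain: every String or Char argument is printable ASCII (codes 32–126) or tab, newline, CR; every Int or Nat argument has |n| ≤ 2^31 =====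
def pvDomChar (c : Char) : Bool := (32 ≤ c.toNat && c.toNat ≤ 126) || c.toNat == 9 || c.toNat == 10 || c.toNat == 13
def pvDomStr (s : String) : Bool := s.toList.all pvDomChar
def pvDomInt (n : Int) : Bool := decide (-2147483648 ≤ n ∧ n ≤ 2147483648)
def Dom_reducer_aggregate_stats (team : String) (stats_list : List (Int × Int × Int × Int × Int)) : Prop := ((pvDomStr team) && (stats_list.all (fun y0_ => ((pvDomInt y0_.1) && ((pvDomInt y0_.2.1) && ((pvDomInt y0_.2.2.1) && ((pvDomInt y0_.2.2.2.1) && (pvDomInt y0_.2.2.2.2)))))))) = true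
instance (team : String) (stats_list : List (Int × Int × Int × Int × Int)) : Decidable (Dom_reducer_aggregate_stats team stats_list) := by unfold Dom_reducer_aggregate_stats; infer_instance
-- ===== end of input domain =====

-- B builds the five totals column-wise (transpose-and-sum) instead of A's row-major
-- loop over five running accumulators; same O(n) cost, more idiomatic decomposition.

-- ===== PORT A =====
-- row-major loop: five running totals updated once per row
def reducer_aggregate_stats (team : String) (stats_list : List (Int × Int × Int × Int × Int)) : List (String × (List (String × Int))) :=
  let totals := stats_list.foldl
    (fun (acc : Int × Int × Int × Int × Int) s =>
      (acc.1 + s.1, acc.2.1 + s.2.1, acc.2.2.1 + s.2.2.1,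
       acc.2.2.2.1 + s.2.2.2.1, acc.2.2.2.2 + s.2.2.2.2))
    (0, 0, 0, 0, 0)
  [(team, [("Goles_Favor", totals.1), ("Goles_Contra", totals.2.1),
           ("Rojas", totals.2.2.1), ("Amarillas", totals.2.2.2.1),
           ("Victorias", totals.2.2.2.2)])]

-- ===== PORT B =====
-- column-major: each column extracted (transposed) and summed independently
def reducer_aggregate_stats_alt (team : String) (stats_list : List (Int × Int × Int × Int × Int)) : List (String × (List (String × Int))) :=
  [(team, [("Goles_Favor", (stats_list.map (·.1)).sum),
           ("Goles_Contra", (stats_list.map (·.2.1)).sum),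
           ("Rojas", (stats_list.map (·.2.2.1)).sum),
           ("Amarillas", (stats_list.map (·.2.2.2.1)).sum),
           ("Victorias", (stats_list.map (·.2.2.2.2)).sum)])]

-- ===== PRECONDITION & SPEC =====
def Spec_reducer_aggregate_stats (team : String) (stats_list : List (Int × Int × Int × Int × Int)) (out : List (String × (List (String × Int)))) : Prop := out = reducer_aggregate_stats_alt team stats_list
instance (team : String) (stats_list : List (Int × Int × Int × Int × Int)) (out : List (String × (List (String × Int)))) : Decidable (Spec_reducer_aggregate_stats team stats_list out) := by unfold Spec_reducer_aggregate_stats; infer_instance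

-- ===== CLAIM (what is proved, stated in full; the proofs are below) =====
def Claim_equal_reducer_aggregate_stats : Prop := ∀ (team : String) (stats_list : List (Int × Int × Int × Int × Int)), Dom_reducer_aggregate_stats team stats_list → Spec_reducer_aggregate_stats team stats_list (reducer_aggregate_stats team stats_list)

-- ===== LEMMAS AND PROOFS =====
theorem pv_fold_totals (stats_list : List (Int × Int × Int × Int × Int))
    (a b c d e : Int) :
    stats_list.foldl
      (fun (acc : Int × Int × Int × Int × Int) s =>
        (acc.1 + s.1, acc.2.1 + s.2.1, acc.2.2.1 + s.2.2.1,
         acc.2.2.2.1 + s.2.2.2.1, acc.2.2.2.2 + s.2.2.2.2))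
      (a, b, c, d, e)
    = (a + (stats_list.map (·.1)).sum,
       b + (stats_list.map (·.2.1)).sum,
       c + (stats_list.map (·.2.2.1)).sum,
       d + (stats_list.map (·.2.2.2.1)).sum,
       e + (stats_list.map (·.2.2.2.2)).sum) := by
  induction stats_list generalizing a b c d e with
  | nil => simp
  | cons h t ih => simp [List.foldl, ih, add_assoc]

theorem reducer_aggregate_stats_spec : Claim_equal_reducer_aggregate_stats := by
  intro team stats_list _
  unfold Spec_reducer_aggregate_stats reducer_aggregate_stats reducer_aggregate_stats_alt
  simp [pv_fold_totals]
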